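-- pv_equiv track=rewrite | github.com/xuxinjing/scheduled_v3 | backend/app/engine/scheduler.py | _consecutive_off_score
-- ===== SOURCE A (Python) =====
-- def _consecutive_off_score(working_days: set[str]) -> int:
--     all_days = ["Monday", "Tuesday", "Wednesday", "Thursday", "Friday", "Saturday", "Sunday"]
--     off = []
--     for day in all_days:
--         if day in ("Monday", "Sunday"):
--             off.append(True)
--         else:
--             off.append(day not in working_days)
--
--     blocks = 0
--     in_block = False
--     for is_off in off:
--         if is_off and not in_block:
--             blocks += 1
--             in_block = True
--         elif not is_off:
--             in_block = False
--
--     max_block_len = 0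
--     current_len = 0
--     for is_off in off:
--         if is_off:
--             current_len += 1
--             max_block_len = max(max_block_len, current_len)
--         else:
--             current_len = 0
--     return -blocks * 10 + max_block_len
-- ===== SOURCE B (Python) =====
-- def _consecutive_off_score(working_days: set[str]) -> int:
--     all_days = ["Monday", "Tuesday", "Wednesday", "Thursday", "Friday", "Saturday", "Sunday"]
--     off = [d in ("Monday", "Sunday") or d not in working_days for d in all_days]
--     # run-length grouping: lengths of maximal runs of True
--     runs = []
--     i = 0
--     n = len(off)
--     while i < n:
--         j = i
--         while j < n and off[j] == off[i]:
--             j += 1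
--         if off[i]:
--             runs.append(j - i)
--         i = j
--     return -len(runs) * 10 + max(runs, default=0)
-- ===== Notes on version B (the rewrite author's own statement) =====
-- stated objective: alternative
-- what changed: Replaces A's two stateful flag/counter scans (in_block block counting and current_len max tracking) by a single run-length grouping of the off list: blocks = number of True-runs, max_block_len = max run length.
import Mathlib
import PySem

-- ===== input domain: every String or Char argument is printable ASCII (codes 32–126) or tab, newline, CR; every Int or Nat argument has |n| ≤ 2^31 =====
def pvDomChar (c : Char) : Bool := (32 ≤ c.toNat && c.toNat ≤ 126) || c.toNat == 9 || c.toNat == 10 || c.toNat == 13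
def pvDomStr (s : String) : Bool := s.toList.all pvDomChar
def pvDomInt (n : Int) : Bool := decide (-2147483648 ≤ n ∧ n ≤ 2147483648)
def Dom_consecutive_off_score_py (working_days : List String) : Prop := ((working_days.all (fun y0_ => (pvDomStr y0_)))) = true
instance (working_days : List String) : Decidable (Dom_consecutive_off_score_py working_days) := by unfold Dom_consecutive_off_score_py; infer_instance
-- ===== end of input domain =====

-- B replaces A's two stateful flag/counter scans by one run-length grouping of the off list; same value everywhere (objective: alternative).

-- ===== PORT A =====
-- A's second loop: count blocks with an in_block flag
def pvBlocksA (off : List Bool) : Int :=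
  (off.foldl (fun (s : Int × Bool) is_off =>
      if is_off && !s.2 then (s.1 + 1, true)
      else if !is_off then (s.1, false)
      else s) (0, false)).1

-- A's third loop: max_block_len via current_len counter
def pvMaxA (off : List Bool) : Int :=
  (off.foldl (fun (s : Int × Int) is_off =>
      if is_off then (max s.1 (s.2 + 1), s.2 + 1)
      else (s.1, 0)) (0, 0)).1

-- A's first loop: build the off list by appending per day
def pvOffA (working_days : List String) : List Bool :=
  ["Monday", "Tuesday", "Wednesday", "Thursday", "Friday", "Saturday", "Sunday"].foldl
    (fun acc day =>
      if day == "Monday" || day == "Sunday" then acc ++ [true]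
      else acc ++ [!(working_days.contains day)]) []

def consecutive_off_score_py (working_days : List String) : Int :=
  -pvBlocksA (pvOffA working_days) * 10 + pvMaxA (pvOffA working_days)

-- ===== PORT B =====
-- B's while loops: split off the leading maximal run, keep its length if the run is of True
def pvRunsGo : Nat → List Bool → List Int
  | 0, _ => []
  | _ + 1, [] => []
  | fuel + 1, b :: rest =>
      let run := rest.takeWhile (fun x => x == b)
      let rem := rest.dropWhile (fun x => x == b)
      if b then ((run.length : Int) + 1) :: pvRunsGo fuel rem else pvRunsGo fuel rem

-- fuel = length makes the run-splitting loop structural (each step consumes ≥ 1 element)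
def pvRunsTrue (l : List Bool) : List Int := pvRunsGo l.length l

-- B's comprehension building the off list
def pvOffB (working_days : List String) : List Bool :=
  ["Monday", "Tuesday", "Wednesday", "Thursday", "Friday", "Saturday", "Sunday"].map
    (fun d => (d == "Monday" || d == "Sunday") || !(working_days.contains d))

def consecutive_off_score_py_alt (working_days : List String) : Int :=
  let runs := pvRunsTrue (pvOffB working_days);
  -(runs.length : Int) * 10 + (PySem.List.max? runs (fun x => x)).getD 0

-- ===== PRECONDITION & SPEC =====
def Spec_consecutive_off_score_py (working_days : List String) (out : Int) : Prop := out = consecutive_off_score_py_alt working_days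
instance (working_days : List String) (out : Int) : Decidable (Spec_consecutive_off_score_py working_days out) := by unfold Spec_consecutive_off_score_py; infer_instance

-- ===== CLAIM (what is proved, stated in full; the proofs are below) =====
def Claim_equal_consecutive_off_score_py : Prop := ∀ (working_days : List String), Dom_consecutive_off_score_py working_days → Spec_consecutive_off_score_py working_days (consecutive_off_score_py working_days)

-- ===== LEMMAS AND PROOFS =====

-- both score formulas agree on every off list of the shape A/B build: [true, b1..b5, true]
lemma pv_key (b1 b2 b3 b4 b5 : Bool) :
    -pvBlocksA [true, b1, b2, b3, b4, b5, true] * 10 + pvMaxA [true, b1, b2, b3, b4, b5, true]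
      = (-((pvRunsTrue [true, b1, b2, b3, b4, b5, true]).length : Int) * 10
        + (PySem.List.max? (pvRunsTrue [true, b1, b2, b3, b4, b5, true]) (fun x => x)).getD 0) := by
  revert b1 b2 b3 b4 b5; decide

-- ===== VERDICT (by name: the statement is the Claim_ definition above) =====
theorem consecutive_off_score_py_spec : Claim_equal_consecutive_off_score_py := by
  intro wd _
  show _ = _
  have hA : pvOffA wd = [true, !wd.contains "Tuesday", !wd.contains "Wednesday",
      !wd.contains "Thursday", !wd.contains "Friday", !wd.contains "Saturday", true] := by
    simp [pvOffA]
  have hB : pvOffB wd = [true, !wd.contains "Tuesday", !wd.contains "Wednesday",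
      !wd.contains "Thursday", !wd.contains "Friday", !wd.contains "Saturday", true] := by
    simp [pvOffB]
  simp only [consecutive_off_score_py, consecutive_off_score_py_alt, hA, hB]
  exact pv_key (!wd.contains "Tuesday") (!wd.contains "Wednesday") (!wd.contains "Thursday")
    (!wd.contains "Friday") (!wd.contains "Saturday")
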